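-- pv_equiv track=rewrite | github.com/JustAnAverageGuy/ideal-enigma | practice/archives/dec31_23/B. Well-known Numbers.py | pre_kbonacci
-- ===== SOURCE A (Python) =====
-- from collections import deque
--
-- def pre_kbonacci(k,maxn=45):
--     f = deque((0 for i in range(k)), maxlen=k+1)
--     f.append(1)
--     A = []
--     for i in range(maxn):
--         A.append(f[-1]-f[0])
--         f.append(2*f[-1] - f[0])
--     return A
-- ===== SOURCE B (Python) =====
-- def pre_kbonacci(k, maxn=45):
--     A = []
--     for i in range(maxn):
--         if i < k:
--             A.append(2**i)
--         else:
--             A.append(sum(A[i-k:i]))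
--     return A
-- ===== Notes on version B (the rewrite author's own statement) =====
-- stated objective: simpler
-- what changed: B drops the deque prefix-sum trick and builds the list directly from the k-bonacci recurrence: entry i is 2**i for i < k and sum(A[i-k:i]) otherwise.
import Mathlib
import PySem

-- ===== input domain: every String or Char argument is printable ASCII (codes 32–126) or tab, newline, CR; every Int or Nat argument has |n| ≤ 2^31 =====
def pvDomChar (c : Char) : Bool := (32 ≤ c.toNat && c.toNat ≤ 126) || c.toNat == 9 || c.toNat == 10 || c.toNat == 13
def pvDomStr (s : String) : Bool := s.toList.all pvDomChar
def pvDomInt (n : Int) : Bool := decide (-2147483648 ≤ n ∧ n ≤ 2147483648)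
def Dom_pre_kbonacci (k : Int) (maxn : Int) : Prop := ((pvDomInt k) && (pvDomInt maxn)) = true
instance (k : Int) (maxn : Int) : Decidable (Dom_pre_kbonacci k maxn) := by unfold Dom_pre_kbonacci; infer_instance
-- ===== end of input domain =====

-- B replaces A's deque prefix-sum trick by building the list directly from the
-- k-bonacci recurrence (2^i seeds, then sum of the previous k entries): simpler, same values.

-- ===== PORT A =====
-- deque.append with a maxlen: appending past maxlen evicts the leftmost element
def dqAppend (maxlen : Int) (f : List Int) (x : Int) : List Int :=
  if maxlen < ((f ++ [x]).length : Int) then (f ++ [x]).drop 1 else f ++ [x]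

def pre_kbonacci (k : Int) (maxn : Int) : List Int :=
  -- f = deque((0 for i in range(k)), maxlen=k+1)  (k zeros; empty for k ≤ 0)
  let f0 : List Int := List.replicate k.toNat 0
  -- f.append(1)
  let f1 := dqAppend (k + 1) f0 1
  -- for i in range(maxn): A.append(f[-1]-f[0]); f.append(2*f[-1]-f[0])
  ((PySem.List.pyRange 0 maxn 1).foldl
    (fun (st : List Int × List Int) _ =>
      (st.1 ++ [PySem.List.pyGetD st.2 (-1) 0 - PySem.List.pyGetD st.2 0 0],
       dqAppend (k + 1) st.2
         (2 * PySem.List.pyGetD st.2 (-1) 0 - PySem.List.pyGetD st.2 0 0))) ([], f1)).1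

-- ===== PORT B =====
def pre_kbonacci_alt (k : Int) (maxn : Int) : List Int :=
  -- for i in range(maxn): A.append(2**i if i < k else sum(A[i-k:i]))
  (PySem.List.pyRange 0 maxn 1).foldl
    (fun A i =>
      A ++ [if i < k then 2 ^ i.toNat else (PySem.List.slice A (some (i - k)) (some i)).sum]) []

-- ===== PRECONDITION & SPEC =====
-- Pre_ excludes exactly the inputs where A raises: k ≤ -2 (ValueError: negative deque maxlen)
-- and k = -1 with maxn ≥ 1 (IndexError on the empty maxlen-0 deque); k = -1 with maxn ≤ 0 returns [] and stays inside.
def Pre_pre_kbonacci (k : Int) (maxn : Int) : Prop := 0 ≤ k ∨ (k = -1 ∧ maxn ≤ 0)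
instance (k : Int) (maxn : Int) : Decidable (Pre_pre_kbonacci k maxn) := by unfold Pre_pre_kbonacci; infer_instance
def pvWitness_pre_kbonacci : Int × Int := (3, 8)

def Spec_pre_kbonacci (k : Int) (maxn : Int) (out : List Int) : Prop := out = pre_kbonacci_alt k maxn
instance (k : Int) (maxn : Int) (out : List Int) : Decidable (Spec_pre_kbonacci k maxn out) := by unfold Spec_pre_kbonacci; infer_instance

-- ===== CLAIM (what is proved, stated in full; the proofs are below) =====
def Claim_equal_pre_kbonacci : Prop := ∀ (k : Int) (maxn : Int), Dom_pre_kbonacci k maxn → Pre_pre_kbonacci k maxn → Spec_pre_kbonacci k maxn (pre_kbonacci k maxn)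

-- ===== LEMMAS AND PROOFS =====

-- The scalar sequence A's deque holds a moving window of: k zeros, then 1, then F n = 2·F (n-1) − F (n-1-k).
def fseq (k : Nat) (n : Nat) : Int :=
  if n < k then 0
  else if n = k then 1
  else 2 * fseq k (n - 1) - fseq k (n - 1 - k)
termination_by n
decreasing_by all_goals omega

lemma fseq_lt {k n : Nat} (h : n < k) : fseq k n = 0 := by
  rw [fseq]; simp [h]

lemma fseq_self (k : Nat) : fseq k k = 1 := by
  rw [fseq]; simp

lemma fseq_rec (k n : Nat) (h : k ≤ n) : fseq k (n + 1) = 2 * fseq k n - fseq k (n - k) := by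
  rw [fseq]
  have h1 : ¬ (n + 1 < k) := by omega
  have h2 : ¬ (n + 1 = k) := by omega
  simp [h1, h2]

-- Both programs' i-th output value
def gval (k j : Nat) : Int := fseq k (j + k) - fseq k j

lemma gval_step (k j : Nat) : fseq k (j + k + 1) - fseq k (j + k) = gval k j := by
  have h := fseq_rec k (j + k) (by omega)
  have h2 : j + k - k = j := by omega
  rw [h2] at h
  unfold gval
  omega

lemma gval_pow (k : Nat) : ∀ i, i < k → fseq k (i + k) = 2 ^ i := by
  intro i
  induction i with
  | zero => intro _; simpa using fseq_self k
  | succ i ih =>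
    intro h
    have h1 : i + 1 + k = (i + k) + 1 := by omega
    rw [h1, fseq_rec k (i + k) (by omega)]
    have h2 : i + k - k = i := by omega
    rw [h2, ih (by omega), fseq_lt (show i < k by omega)]
    ring

lemma tele (k : Nat) (s : Nat) : ∀ t : Nat,
    ((List.range t).map (fun d => fseq k (s + d + 1) - fseq k (s + d))).sum
      = fseq k (s + t) - fseq k s := by
  intro t
  induction t with
  | zero => simp
  | succ t ih =>
    rw [List.range_succ, List.map_append, List.sum_append, ih]
    have : s + (t + 1) = s + t + 1 := by omega
    rw [this]
    simp

-- the initial deque [0,…,0,1] as a window of fseq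
lemma init_window (k : Nat) :
    List.replicate k (0 : Int) ++ [1] = (List.range (k + 1)).map (fun j => fseq k (0 + j)) := by
  simp only [Nat.zero_add]
  rw [List.range_succ, List.map_append]
  congr 1
  · symm
    have h := List.eq_replicate_of_mem (l := (List.range k).map (fun j => fseq k j)) (a := (0:Int))
      (by intro b hb
          obtain ⟨j, hj, rfl⟩ := List.mem_map.mp hb
          exact fseq_lt (List.mem_range.mp hj))
    simpa using h
  · simp [fseq_self]

-- A's loop invariant: after m iterations the output is the first m gvals and the deque is the window at m
lemma A_loop (k : Nat) (m : Nat) :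
    (PySem.List.pyRange 0 (m : Int) 1).foldl
      (fun (st : List Int × List Int) _ =>
        (st.1 ++ [PySem.List.pyGetD st.2 (-1) 0 - PySem.List.pyGetD st.2 0 0],
         dqAppend ((k : Int) + 1) st.2
           (2 * PySem.List.pyGetD st.2 (-1) 0 - PySem.List.pyGetD st.2 0 0)))
      ([], (List.range (k + 1)).map (fun j => fseq k (0 + j)))
    = ((List.range m).map (gval k), (List.range (k + 1)).map (fun j => fseq k (m + j))) := by
  induction m with
  | zero => simp [PySem.List.pyRange_one_eq_nil]
  | succ m ih =>
    have hc : ((m + 1 : Nat) : Int) = (m : Int) + 1 := by push_cast; ring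
    rw [hc, PySem.List.pyRange_one_succ_right (by positivity), List.foldl_append, ih]
    simp only [List.foldl_cons, List.foldl_nil]
    -- the deque at step m, decomposed from both ends
    have hcons : (List.range (k + 1)).map (fun j => fseq k (m + j))
        = fseq k (m + 0) :: (List.range k).map (fun j => fseq k (m + (j + 1))) := by
      rw [List.range_succ_eq_map]
      simp [Function.comp]
    have hsnoc : (List.range (k + 1)).map (fun j => fseq k (m + j))
        = (List.range k).map (fun j => fseq k (m + j)) ++ [fseq k (m + k)] := by
      rw [List.range_succ, List.map_append]
      simp
    have hlast : PySem.List.pyGetD ((List.range (k + 1)).map (fun j => fseq k (m + j))) (-1) 0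
        = fseq k (m + k) := by
      rw [hsnoc]; exact PySem.List.pyGetD_neg_one_append_singleton _ _ _
    have hhead : PySem.List.pyGetD ((List.range (k + 1)).map (fun j => fseq k (m + j))) 0 0
        = fseq k (m + 0) := by
      rw [hcons]; exact PySem.List.pyGetD_zero_cons _ _ _
    rw [hlast, hhead]
    -- the appended scalar is the next fseq value
    have hnext : 2 * fseq k (m + k) - fseq k (m + 0) = fseq k (m + k + 1) := by
      rw [fseq_rec k (m + k) (by omega)]
      have : m + k - k = m := by omega
      rw [this]
      simp
    rw [Prod.mk.injEq]
    constructor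
    · -- output list gains gval k m
      rw [List.range_succ, List.map_append]
      simp [gval]
    · -- deque slides to the window at m+1
      unfold dqAppend
      have hlen : (((List.range (k + 1)).map (fun j => fseq k (m + j)) ++
          [2 * fseq k (m + k) - fseq k (m + 0)]).length : Int) = (k : Int) + 2 := by
        simp
        ring
      rw [if_pos (by rw [hlen]; omega)]
      rw [hcons]
      simp only [List.cons_append, List.drop_succ_cons, List.drop_zero]
      rw [hnext]
      have hsnoc' : (List.range (k + 1)).map (fun j => fseq k (m + 1 + j))
          = (List.range k).map (fun j => fseq k (m + 1 + j)) ++ [fseq k (m + 1 + k)] := by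
        rw [List.range_succ, List.map_append]; simp
      rw [hsnoc']
      congr 1
      · apply List.map_congr_left
        intro j _
        congr 1
        omega
      · have he : m + k + 1 = m + 1 + k := by omega
        rw [he]

lemma B_loop (k : Nat) (m : Nat) :
    (PySem.List.pyRange 0 (m : Int) 1).foldl
      (fun A i =>
        A ++ [if i < (k : Int) then 2 ^ i.toNat
              else (PySem.List.slice A (some (i - (k : Int))) (some i)).sum]) []
    = (List.range m).map (gval k) := by
  induction m with
  | zero => simp [PySem.List.pyRange_one_eq_nil]
  | succ m ih =>
    have hc : ((m + 1 : Nat) : Int) = (m : Int) + 1 := by push_cast; ring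
    rw [hc, PySem.List.pyRange_one_succ_right (by positivity), List.foldl_append, ih]
    simp only [List.foldl_cons, List.foldl_nil]
    rw [List.range_succ, List.map_append]
    congr 1
    by_cases hm : m < k
    · -- seed entries: 2^m
      rw [if_pos (by exact_mod_cast hm)]
      have : gval k m = 2 ^ m := by
        unfold gval
        rw [gval_pow k m hm, fseq_lt hm]
        ring
      simp [this]
    · -- window-sum entries
      rw [if_neg (by exact_mod_cast hm)]
      rw [Nat.not_lt] at hm
      have hsub : (m : Int) - (k : Int) = ((m - k : Nat) : Int) := by omega
      rw [hsub, PySem.List.slice_natCast]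
      have h1 : ((List.range m).map (gval k)).drop (m - k)
          = (List.range k).map (fun d => gval k (m - k + d)) := by
        rw [← List.map_drop, List.range_eq_range', List.drop_range']
        have h0 : 0 + (m - k) * 1 = m - k := by omega
        have hk : m - (m - k) = k := by omega
        rw [h0, hk, List.range'_eq_map_range, List.map_map]
        rfl
      rw [h1]
      have h2 : m - (m - k) = k := by omega
      rw [h2, List.take_of_length_le (by simp)]
      have h3 : (List.range k).map (fun d => gval k (m - k + d))
          = (List.range k).map (fun d => fseq k (m + d + 1) - fseq k (m + d)) := by
        apply List.map_congr_left
        intro d _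
        rw [← gval_step k (m - k + d)]
        have e1 : m - k + d + k + 1 = m + d + 1 := by omega
        have e2 : m - k + d + k = m + d := by omega
        rw [e1, e2]
      rw [h3, tele k m k]
      unfold gval
      rfl

-- ===== VERDICT (by name: the statement is the Claim_ definition above) =====
lemma init_deque (kn : Nat) :
    dqAppend ((kn : Int) + 1) (List.replicate kn (0 : Int)) 1
      = (List.range (kn + 1)).map (fun j => fseq kn (0 + j)) := by
  unfold dqAppend
  rw [if_neg (by simp)]
  exact init_window kn

theorem pre_kbonacci_spec : Claim_equal_pre_kbonacci := by
  intro k maxn _ hpre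
  unfold Spec_pre_kbonacci
  rcases hpre with hk | ⟨hk, hmn⟩
  · by_cases hmn : maxn ≤ 0
    · -- empty range: both return []
      unfold pre_kbonacci pre_kbonacci_alt
      rw [PySem.List.pyRange_one_eq_nil (by omega)]
      simp
    · obtain ⟨kn, rfl⟩ : ∃ kn : Nat, (kn : Int) = k := ⟨k.toNat, Int.toNat_of_nonneg hk⟩
      obtain ⟨mn, rfl⟩ : ∃ mn : Nat, (mn : Int) = maxn := ⟨maxn.toNat, Int.toNat_of_nonneg (by omega)⟩
      unfold pre_kbonacci pre_kbonacci_alt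
      simp only [Int.toNat_natCast]
      rw [init_deque kn, A_loop kn mn, B_loop kn mn]
  · -- k = -1, maxn ≤ 0: both return []
    subst hk
    unfold pre_kbonacci pre_kbonacci_alt
    rw [PySem.List.pyRange_one_eq_nil (by omega)]
    simp
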